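-- pv_equiv track=rewrite | github.com/garymooney/qmuvi | quantum_music_ghz_noisy.py | round_to_scale
-- ===== SOURCE A (Python) =====
-- C_MAJ = [0, 2, 4, 5, 7, 9, 11, 12, 14, 16, 17, 19, 21, 23, 24, 26, 28, 29, 31, 33, 35, 36, 38, 40, 41, 43, 45, 47, 48, 50, 52, 53, 55, 57, 59, 60, 62, 64, 65, 67, 69, 71, 72, 74, 76, 77, 79, 81, 83, 84, 86, 88, 89, 91, 93, 95, 96, 98, 100, 101, 103, 105, 107, 108, 110, 112, 113, 115, 117, 119, 120, 122, 124, 125, 127]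
--
-- def round_to_scale(n, scale = C_MAJ):
--     CURR_MODE = scale
--     note = 60+n
--
--     # Shifting
--     if CURR_MODE and note < CURR_MODE[0]:
--         note = CURR_MODE[0]
--     else:
--         while (CURR_MODE and note not in CURR_MODE):
--             note -= 1
--     return note
-- ===== SOURCE B (Python) =====
-- C_MAJ = [0, 2, 4, 5, 7, 9, 11, 12, 14, 16, 17, 19, 21, 23, 24, 26, 28, 29, 31, 33, 35, 36, 38, 40, 41, 43, 45, 47, 48, 50, 52, 53, 55, 57, 59, 60, 62, 64, 65, 67, 69, 71, 72, 74, 76, 77, 79, 81, 83, 84, 86, 88, 89, 91, 93, 95, 96, 98, 100, 101, 103, 105, 107, 108, 110, 112, 113, 115, 117, 119, 120, 122, 124, 125, 127]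
--
-- def round_to_scale(n, scale=C_MAJ):
--     note = 60 + n
--     if not scale:
--         return note
--     if note < scale[0]:
--         return scale[0]
--     return max(x for x in scale if x <= note)
-- ===== Notes on version B (the rewrite author's own statement) =====
-- stated objective: alternative
-- what changed: Replaced the decrement-and-membership-test while loop (note -= 1 until note in scale) with a single max over the scale elements <= note, after the same empty/below-first-element checks.
import Mathlib
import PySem

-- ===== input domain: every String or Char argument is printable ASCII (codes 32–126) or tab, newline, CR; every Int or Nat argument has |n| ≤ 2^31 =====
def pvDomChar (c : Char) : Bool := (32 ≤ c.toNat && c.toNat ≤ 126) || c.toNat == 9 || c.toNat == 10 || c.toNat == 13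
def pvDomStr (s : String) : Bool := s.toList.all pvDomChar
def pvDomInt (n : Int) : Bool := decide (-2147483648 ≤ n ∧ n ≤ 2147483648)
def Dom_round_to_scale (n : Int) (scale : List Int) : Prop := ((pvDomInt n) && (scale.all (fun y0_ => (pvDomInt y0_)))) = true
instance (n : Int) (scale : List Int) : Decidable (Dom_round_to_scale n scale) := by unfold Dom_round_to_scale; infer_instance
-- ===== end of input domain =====

-- B replaces A's decrement-until-membership while loop by one max over the scale elements ≤ note (objective: alternative).

-- ===== PORT A =====
-- the 'while note not in CURR_MODE: note -= 1' loop; the 'scale.headD 0 < note' test only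
-- guards termination: on every input the Python loop reaches (scale nonempty, scale[0] ≤ note)
-- it is implied by 'note ∉ scale' before the loop would go below scale[0].
def roundWhileA (scale : List Int) (note : Int) : Int :=
  if scale ≠ [] ∧ note ∉ scale then
    if h : scale.headD 0 < note then roundWhileA scale (note - 1) else note
  else note
termination_by (note - scale.headD 0).toNat
decreasing_by omega

def round_to_scale (n : Int) (scale : List Int) : Int :=
  let note := 60 + n
  if scale ≠ [] ∧ note < scale.headD 0 then scale.headD 0
  else roundWhileA scale note

-- ===== PORT B =====
def round_to_scale_alt (n : Int) (scale : List Int) : Int :=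
  let note := 60 + n
  match scale with
  | [] => note
  | c :: rest =>
    if note < c then c
    else (PySem.List.max? ((c :: rest).filter (fun x => x ≤ note)) (fun x => x)).getD note

-- ===== PRECONDITION & SPEC =====
def Spec_round_to_scale (n : Int) (scale : List Int) (out : Int) : Prop := out = round_to_scale_alt n scale
instance (n : Int) (scale : List Int) (out : Int) : Decidable (Spec_round_to_scale n scale out) := by unfold Spec_round_to_scale; infer_instance

-- ===== CLAIM (what is proved, stated in full; the proofs are below) =====
def Claim_equal_round_to_scale : Prop := ∀ (n : Int) (scale : List Int), Dom_round_to_scale n scale → Spec_round_to_scale n scale (round_to_scale n scale)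

-- ===== LEMMAS AND PROOFS =====

theorem roundWhileA_eq_max (c : Int) (rest : List Int) (note : Int) (h : c ≤ note) :
    PySem.List.max? ((c :: rest).filter (fun x => x ≤ note)) (fun x => x)
      = some (roundWhileA (c :: rest) note) := by
  by_cases hm : note ∈ c :: rest
  · rw [roundWhileA]
    simp only [ne_eq, reduceCtorEq, not_false_eq_true, hm, not_true_eq_false,
      and_false, if_false]
    -- max of the filtered list is note itself
    have hnf : note ∈ (c :: rest).filter (fun x => decide (x ≤ note)) := by
      simp [List.mem_filter, hm]
    rcases hmm : PySem.List.max? ((c :: rest).filter (fun x => x ≤ note)) (fun x => x) with _ | m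
    · exact absurd ((Iff.mp (PySem.List.max?_eq_none_iff _ _) hmm) ▸ hnf) (List.not_mem_nil)
    · have hmem := PySem.List.max?_mem hmm
      have hle : m ≤ note := by
        have := (List.mem_filter.mp hmem).2
        simpa using this
      have hge : note ≤ m := PySem.List.max?_isMax hmm note hnf
      exact congrArg some (le_antisymm hle hge)
  · have hne : note ≠ c := fun e => hm (e ▸ List.mem_cons_self)
    have hlt : c < note := lt_of_le_of_ne h (Ne.symm hne)
    rw [roundWhileA]
    simp only [ne_eq, reduceCtorEq, not_false_eq_true, true_and, hm, not_false_eq_true, if_true,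
      List.headD_cons]
    rw [dif_pos hlt]
    have hfilt : (c :: rest).filter (fun x => x ≤ note) = (c :: rest).filter (fun x => x ≤ note - 1) := by
      apply List.filter_congr
      intro x hx
      have hxne : x ≠ note := fun e => hm (e ▸ hx)
      simp only [decide_eq_decide]
      omega
    rw [hfilt]
    exact roundWhileA_eq_max c rest (note - 1) (by omega)
termination_by (note - c).toNat
decreasing_by omega

theorem roundWhileA_nil (note : Int) : roundWhileA [] note = note := by
  rw [roundWhileA]; simp

-- ===== VERDICT (by name: the statement is the Claim_ definition above) =====
theorem round_to_scale_spec : Claim_equal_round_to_scale := by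
  intro n scale _
  unfold Spec_round_to_scale round_to_scale round_to_scale_alt
  cases scale with
  | nil => simp [roundWhileA_nil]
  | cons c rest =>
    by_cases hlt : 60 + n < c
    · simp [hlt]
    · simp only [ne_eq, reduceCtorEq, not_false_eq_true, true_and, List.headD_cons, hlt,
        if_false]
      rw [roundWhileA_eq_max c rest (60 + n) (by omega)]
      rfl
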